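-- pv_equiv track=rewrite | github.com/sherhacky/aoc22 | day15.py | omitted_positions
-- ===== SOURCE A (Python) =====
-- def omitted_positions(pairs, y):
--     omitted = set()
--     not_omitted = set()
--     for [sensor, beacon] in pairs:
--         distance = sum([abs(sensor[i] - beacon[i]) for i in [0,1]])
--         [a, b] = sensor
--         if abs(y-b) <= distance:
--             for i in range(distance-abs(y-b)+1):
--                 omitted.add(a+i)
--                 omitted.add(a-i)
--         if beacon[1] == y:
--             not_omitted.add(beacon[0])
--     omitted -= not_omitted
--     return omitted
-- ===== SOURCE B (Python) =====
-- def omitted_positions(pairs, y):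
--     # stage 1: one covered x-interval per sensor that reaches row y
--     intervals = []
--     for pr in pairs:
--         sensor, beacon = pr[0], pr[1]
--         a, b = sensor[0], sensor[1]
--         reach = abs(a - beacon[0]) + abs(b - beacon[1]) - abs(y - b)
--         if reach >= 0:
--             intervals.append((a - reach, a + reach))
--     # stage 2: sort by left endpoint and merge overlapping/adjacent intervals
--     intervals.sort(key=lambda iv: iv[0])
--     merged = []
--     for iv in intervals:
--         if merged and iv[0] <= merged[-1][1] + 1:
--             merged[-1] = (merged[-1][0], max(merged[-1][1], iv[1]))
--         else:
--             merged.append(iv)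
--     # stage 3: materialize the disjoint intervals, skipping beacons on row y
--     beacons = {pr[1][0] for pr in pairs if pr[1][1] == y}
--     result = set()
--     for lo, hi in merged:
--         for x in range(lo, hi + 1):
--             if x not in beacons:
--                 result.add(x)
--     return result
-- ===== Notes on version B (the rewrite author's own statement) =====
-- stated objective: alternative
-- what changed: B replaces A's per-sensor symmetric cell-by-cell set accumulation with a staged interval algorithm: it builds one covered x-interval per sensor, sorts the intervals by left endpoint, merges overlapping/adjacent ones into disjoint intervals, and only then materializes the merged intervals while skipping row-y beacon x-coordinates gathered separately.
import Mathlib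
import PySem

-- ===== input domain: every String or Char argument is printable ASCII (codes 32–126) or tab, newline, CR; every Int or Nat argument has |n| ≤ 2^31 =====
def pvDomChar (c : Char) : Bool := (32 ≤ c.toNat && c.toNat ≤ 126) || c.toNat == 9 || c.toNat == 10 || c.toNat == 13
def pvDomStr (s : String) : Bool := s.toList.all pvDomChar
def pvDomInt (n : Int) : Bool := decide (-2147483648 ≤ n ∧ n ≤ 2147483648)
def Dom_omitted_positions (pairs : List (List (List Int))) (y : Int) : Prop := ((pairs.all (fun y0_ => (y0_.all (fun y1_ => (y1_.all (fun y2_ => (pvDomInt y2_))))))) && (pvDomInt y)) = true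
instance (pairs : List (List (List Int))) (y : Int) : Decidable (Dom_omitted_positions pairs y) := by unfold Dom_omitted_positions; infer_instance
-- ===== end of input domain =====

-- B replaces A's per-sensor cell-by-cell set accumulation with a staged interval algorithm
-- (per-sensor intervals, sort by left endpoint, merge overlapping/adjacent, materialize,
-- subtract row-y beacon x's); objective: alternative. Both Pythons return a SET, which has
-- no specified iteration order, so both ports return the canonical ascending enumeration
-- of that set (PySem.List.sorted at the return; outputs are compared as finite sets).

-- ===== PORT A =====
-- the body of A's 'for [sensor, beacon] in pairs' loop, verbatim
def stepA (y : Int) (st : PySem.Set Int × PySem.Set Int) (pair : List (List Int)) :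
    PySem.Set Int × PySem.Set Int :=
  let sensor := PySem.List.pyGetD pair 0 []
  let beacon := PySem.List.pyGetD pair 1 []
  let distance := (([0, 1] : List Int).map
    (fun i => |PySem.List.pyGetD sensor i 0 - PySem.List.pyGetD beacon i 0|)).sum
  let a := PySem.List.pyGetD sensor 0 0
  let b := PySem.List.pyGetD sensor 1 0
  let omitted := if |y - b| ≤ distance then
      (PySem.List.pyRange 0 (distance - |y - b| + 1) 1).foldl
        (fun om i => PySem.Set.add (PySem.Set.add om (a + i)) (a - i)) st.1
    else st.1
  let not_omitted := if PySem.List.pyGetD beacon 1 0 = y then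
      PySem.Set.add st.2 (PySem.List.pyGetD beacon 0 0)
    else st.2
  (omitted, not_omitted)

def omitted_positions (pairs : List (List (List Int))) (y : Int) : List Int :=
  let st := pairs.foldl (stepA y) (PySem.Set.empty, PySem.Set.empty)
  PySem.List.sorted (PySem.Set.diff st.1 st.2) (fun x => x)

-- ===== PORT B =====
-- stage 1 of Source B: one covered interval per sensor that reaches row y ('intervals.append')
def ivStep (y : Int) (acc : List (Int × Int)) (pr : List (List Int)) : List (Int × Int) :=
  let sensor := PySem.List.pyGetD pr 0 ([] : List Int)
  let beacon := PySem.List.pyGetD pr 1 ([] : List Int)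
  let a := PySem.List.pyGetD sensor 0 0
  let b := PySem.List.pyGetD sensor 1 0
  let reach := |a - PySem.List.pyGetD beacon 0 0| + |b - PySem.List.pyGetD beacon 1 0| - |y - b|
  if 0 ≤ reach then acc ++ [(a - reach, a + reach)] else acc

def intervalsB (pairs : List (List (List Int))) (y : Int) : List (Int × Int) :=
  pairs.foldl (ivStep y) []

-- stage 2 loop body; 'merged[-1]' is the head of the reversed accumulator
def mergeStep (acc : List (Int × Int)) (iv : Int × Int) : List (Int × Int) :=
  match acc with
  | [] => [iv]
  | c :: rest => if iv.1 ≤ c.2 + 1 then (c.1, max c.2 iv.2) :: rest else iv :: c :: rest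

-- stage 3 set comprehension: beacon x's on row y
def beaconsB (pairs : List (List (List Int))) (y : Int) : PySem.Set Int :=
  PySem.Set.ofList ((pairs.filter
      (fun pr => PySem.List.pyGetD (PySem.List.pyGetD pr 1 []) 1 0 == y)).map
    (fun pr => PySem.List.pyGetD (PySem.List.pyGetD pr 1 []) 0 0))

def omitted_positions_alt (pairs : List (List (List Int))) (y : Int) : List Int :=
  let intervals := PySem.List.sorted (intervalsB pairs y) Prod.fst
  let merged := (intervals.foldl mergeStep []).reverse
  let beacons := beaconsB pairs y
  let result := merged.foldl (fun res p =>
      (PySem.List.pyRange p.1 (p.2 + 1) 1).foldl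
        (fun res x => if beacons.contains x then res else PySem.Set.add res x) res)
    (PySem.Set.empty)
  PySem.List.sorted result (fun x => x)

-- ===== PRECONDITION & SPEC =====
-- Pre_ excludes exactly the inputs where the Python A raises: a pair that is not a 2-list
-- (ValueError on unpacking), a sensor not of length exactly 2, or a beacon of length < 2 (IndexError).
def Pre_omitted_positions (pairs : List (List (List Int))) (y : Int) : Prop :=
  ∀ pr ∈ pairs, pr.length = 2 ∧ (PySem.List.pyGetD pr 0 ([] : List Int)).length = 2 ∧
    2 ≤ (PySem.List.pyGetD pr 1 ([] : List Int)).length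
instance (pairs : List (List (List Int))) (y : Int) : Decidable (Pre_omitted_positions pairs y) := by
  unfold Pre_omitted_positions; infer_instance

def pvWitness_omitted_positions : List (List (List Int)) × Int := ([[[0, 0], [0, 0]], [[3, 1], [4, 1]]], 1)

def Spec_omitted_positions (pairs : List (List (List Int))) (y : Int) (out : List Int) : Prop := out = omitted_positions_alt pairs y
instance (pairs : List (List (List Int))) (y : Int) (out : List Int) : Decidable (Spec_omitted_positions pairs y out) := by unfold Spec_omitted_positions; infer_instance

-- ===== CLAIM (what is proved, stated in full; the proofs are below) =====
def Claim_equal_omitted_positions : Prop := ∀ (pairs : List (List (List Int))) (y : Int), Dom_omitted_positions pairs y → Pre_omitted_positions pairs y → Spec_omitted_positions pairs y (omitted_positions pairs y)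

-- ===== LEMMAS AND PROOFS =====

-- the flattened list of x's A's inner loop adds for one pair
def coveredA (y : Int) (pr : List (List Int)) : List Int :=
  let sensor := PySem.List.pyGetD pr 0 ([] : List Int)
  let beacon := PySem.List.pyGetD pr 1 ([] : List Int)
  let d := (([0, 1] : List Int).map
    (fun i => |PySem.List.pyGetD sensor i 0 - PySem.List.pyGetD beacon i 0|)).sum
  let a := PySem.List.pyGetD sensor 0 0
  let b := PySem.List.pyGetD sensor 1 0
  if |y - b| ≤ d then
    (PySem.List.pyRange 0 (d - |y - b| + 1) 1).flatMap (fun i => [a + i, a - i])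
  else []

-- A's nested 'omitted.add(a+i); omitted.add(a-i)' loop is a Set.update by the flattened pair list
theorem foldl_double_add (f g : Int → Int) (l : List Int) (om : PySem.Set Int) :
    l.foldl (fun om i => PySem.Set.add (PySem.Set.add om (f i)) (g i)) om
      = PySem.Set.update om (l.flatMap (fun i => [f i, g i])) := by
  induction l generalizing om with
  | nil => rfl
  | cons x xs ih => simp [List.foldl, PySem.Set.update_cons, ih]

-- A's loop body expressed through coveredA and the beacon singleton
theorem stepA_eq (y : Int) (om nom : PySem.Set Int) (pr : List (List Int)) :
    stepA y (om, nom) pr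
      = (PySem.Set.update om (coveredA y pr),
         PySem.Set.update nom (if PySem.List.pyGetD (PySem.List.pyGetD pr 1 []) 1 0 == y then
            [PySem.List.pyGetD (PySem.List.pyGetD pr 1 []) 0 0] else [])) := by
  rw [Prod.mk.injEq]
  constructor
  · show (if |y - _| ≤ _ then _ else om) = _
    simp only [coveredA]
    split_ifs with h
    · rw [foldl_double_add]
    · rw [PySem.Set.update_nil]
  · show (if PySem.List.pyGetD (PySem.List.pyGetD pr 1 []) 1 0 = y then _ else nom) = _
    by_cases h : PySem.List.pyGetD (PySem.List.pyGetD pr 1 []) 1 0 = y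
    · simp [h, PySem.Set.update_cons, PySem.Set.update_nil]
    · simp [h, PySem.Set.update_nil]

-- A's whole loop: the two sets as updates by the flat-mapped covered list and the beacon list
theorem outer_loop (y : Int) (pairs : List (List (List Int))) :
    ∀ om nom : PySem.Set Int,
    pairs.foldl (stepA y) (om, nom)
      = (PySem.Set.update om (pairs.flatMap (coveredA y)),
         PySem.Set.update nom
          ((pairs.filter (fun pr => PySem.List.pyGetD (PySem.List.pyGetD pr 1 []) 1 0 == y)).map
            (fun pr => PySem.List.pyGetD (PySem.List.pyGetD pr 1 []) 0 0))) := by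
  induction pairs with
  | nil => intro om nom; rfl
  | cons pr rest ih =>
    intro om nom
    rw [List.foldl_cons, stepA_eq, ih, List.flatMap_cons, PySem.Set.update_append,
      List.filter_cons]
    by_cases h : PySem.List.pyGetD (PySem.List.pyGetD pr 1 []) 1 0 = y
    · simp [h, PySem.Set.update_cons, PySem.Set.update_nil]
    · simp [h, PySem.Set.update_nil]

-- membership in the flattened inner-loop list, generically
theorem mem_covered_gen (a t d x : Int) :
    (x ∈ if t ≤ d then
        (PySem.List.pyRange 0 (d - t + 1) 1).flatMap (fun i => [a + i, a - i])
      else ([] : List Int))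
      ↔ t ≤ d ∧ a - (d - t) ≤ x ∧ x ≤ a + (d - t) := by
  split_ifs with h
  · simp only [List.mem_flatMap, PySem.List.mem_pyRange_one, List.mem_cons,
      List.not_mem_nil, or_false]
    constructor
    · rintro ⟨i, ⟨h0, h1⟩, hx | hx⟩ <;> subst hx <;> exact ⟨h, by omega, by omega⟩
    · rintro ⟨-, hlo, hhi⟩
      by_cases hc : a ≤ x
      · exact ⟨x - a, by omega, by left; omega⟩
      · exact ⟨a - x, by omega, by right; omega⟩
  · simp only [List.not_mem_nil, false_iff]
    omega

theorem mem_coveredA (y : Int) (pr : List (List Int)) (x : Int) :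
    x ∈ coveredA y pr
      ↔ (0 ≤ |PySem.List.pyGetD (PySem.List.pyGetD pr 0 []) 0 0
              - PySem.List.pyGetD (PySem.List.pyGetD pr 1 []) 0 0|
           + |PySem.List.pyGetD (PySem.List.pyGetD pr 0 []) 1 0
              - PySem.List.pyGetD (PySem.List.pyGetD pr 1 []) 1 0|
           - |y - PySem.List.pyGetD (PySem.List.pyGetD pr 0 []) 1 0|
         ∧ PySem.List.pyGetD (PySem.List.pyGetD pr 0 []) 0 0
             - (|PySem.List.pyGetD (PySem.List.pyGetD pr 0 []) 0 0
                  - PySem.List.pyGetD (PySem.List.pyGetD pr 1 []) 0 0|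
                + |PySem.List.pyGetD (PySem.List.pyGetD pr 0 []) 1 0
                  - PySem.List.pyGetD (PySem.List.pyGetD pr 1 []) 1 0|
                - |y - PySem.List.pyGetD (PySem.List.pyGetD pr 0 []) 1 0|) ≤ x
         ∧ x ≤ PySem.List.pyGetD (PySem.List.pyGetD pr 0 []) 0 0
             + (|PySem.List.pyGetD (PySem.List.pyGetD pr 0 []) 0 0
                  - PySem.List.pyGetD (PySem.List.pyGetD pr 1 []) 0 0|
                + |PySem.List.pyGetD (PySem.List.pyGetD pr 0 []) 1 0
                  - PySem.List.pyGetD (PySem.List.pyGetD pr 1 []) 1 0|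
                - |y - PySem.List.pyGetD (PySem.List.pyGetD pr 0 []) 1 0|)) := by
  unfold coveredA
  simp only [List.map_cons, List.map_nil, List.sum_cons, List.sum_nil, add_zero]
  rw [mem_covered_gen]
  constructor <;> (rintro ⟨h1, h2, h3⟩; exact ⟨by omega, by omega, by omega⟩)

-- x is covered by some interval of the list
def covP (l : List (Int × Int)) (x : Int) : Prop := ∃ p ∈ l, p.1 ≤ x ∧ x ≤ p.2

theorem covP_nil (x : Int) : ¬ covP [] x := by simp [covP]

theorem covP_cons (p : Int × Int) (l : List (Int × Int)) (x : Int) :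
    covP (p :: l) x ↔ (p.1 ≤ x ∧ x ≤ p.2) ∨ covP l x := by
  simp only [covP, List.mem_cons]
  constructor
  · rintro ⟨q, hq | hq, hx⟩
    · exact Or.inl (hq ▸ hx)
    · exact Or.inr ⟨q, hq, hx⟩
  · rintro (hx | ⟨q, hq, hx⟩)
    · exact ⟨p, Or.inl rfl, hx⟩
    · exact ⟨q, Or.inr hq, hx⟩

theorem covP_perm {l m : List (Int × Int)} (h : l.Perm m) (x : Int) : covP l x ↔ covP m x := by
  unfold covP
  constructor <;> rintro ⟨p, hp, hx⟩
  · exact ⟨p, h.mem_iff.mp hp, hx⟩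
  · exact ⟨p, h.mem_iff.mpr hp, hx⟩

theorem covP_append_singleton (l : List (Int × Int)) (p : Int × Int) (x : Int) :
    covP (l ++ [p]) x ↔ covP l x ∨ (p.1 ≤ x ∧ x ≤ p.2) := by
  simp only [covP, List.mem_append, List.mem_singleton]
  constructor
  · rintro ⟨q, hq | hq, hx⟩
    · exact Or.inl ⟨q, hq, hx⟩
    · exact Or.inr (hq ▸ hx)
  · rintro (⟨q, hq, hx⟩ | hx)
    · exact ⟨q, Or.inl hq, hx⟩
    · exact ⟨p, Or.inr rfl, hx⟩

-- stage 1: coverage by the interval list = membership in A's flattened per-pair lists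
theorem covP_intervalsB_aux (y : Int) (pairs : List (List (List Int))) :
    ∀ (acc : List (Int × Int)) (x : Int),
    covP (pairs.foldl (ivStep y) acc) x ↔ covP acc x ∨ ∃ pr ∈ pairs, x ∈ coveredA y pr := by
  induction pairs with
  | nil => intro acc x; simp [List.foldl_nil]
  | cons pr rest ih =>
    intro acc x
    rw [List.foldl_cons, ih]
    have hmem := mem_coveredA y pr x
    simp only [ivStep]
    simp only [List.mem_cons]
    split_ifs with h
    · rw [covP_append_singleton]
      constructor
      · rintro ((hc | hx) | ⟨q, hq, hqx⟩)
        · exact Or.inl hc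
        · exact Or.inr ⟨pr, Or.inl rfl, hmem.mpr ⟨h, hx.1, hx.2⟩⟩
        · exact Or.inr ⟨q, Or.inr hq, hqx⟩
      · rintro (hc | ⟨q, hq | hq, hqx⟩)
        · exact Or.inl (Or.inl hc)
        · subst hq
          obtain ⟨-, h1, h2⟩ := hmem.mp hqx
          exact Or.inl (Or.inr ⟨h1, h2⟩)
        · exact Or.inr ⟨q, hq, hqx⟩
    · constructor
      · rintro (hc | ⟨q, hq, hqx⟩)
        · exact Or.inl hc
        · exact Or.inr ⟨q, Or.inr hq, hqx⟩
      · rintro (hc | ⟨q, hq | hq, hqx⟩)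
        · exact Or.inl hc
        · subst hq
          obtain ⟨h0, -, -⟩ := hmem.mp hqx
          exact absurd h0 h
        · exact Or.inr ⟨q, hq, hqx⟩

theorem covP_intervalsB (pairs : List (List (List Int))) (y : Int) (x : Int) :
    covP (intervalsB pairs y) x ↔ ∃ pr ∈ pairs, x ∈ coveredA y pr := by
  unfold intervalsB
  rw [covP_intervalsB_aux]
  have := covP_nil x
  tauto

theorem mergeStep_nil (iv : Int × Int) : mergeStep [] iv = [iv] := rfl
theorem mergeStep_cons (c : Int × Int) (racc : List (Int × Int)) (iv : Int × Int) :
    mergeStep (c :: racc) iv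
      = if iv.1 ≤ c.2 + 1 then (c.1, max c.2 iv.2) :: racc else iv :: c :: racc := rfl

-- stage 2: merging preserves coverage (input sorted by left endpoint)
theorem covP_merge (l : List (Int × Int)) :
    ∀ acc : List (Int × Int),
    l.Pairwise (fun p q => p.1 ≤ q.1) →
    (∀ c, acc.head? = some c → ∀ p ∈ l, c.1 ≤ p.1) →
    ∀ x, covP (l.foldl mergeStep acc) x ↔ covP acc x ∨ covP l x := by
  induction l with
  | nil =>
    intro acc _ _ x
    simp only [List.foldl_nil]
    exact ⟨Or.inl, fun h => h.elim id (fun h => absurd h (covP_nil x))⟩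
  | cons iv rest ih =>
    intro acc hs hacc x
    rw [List.pairwise_cons] at hs
    rw [List.foldl_cons]
    match acc with
    | [] =>
      rw [mergeStep_nil,
        ih [iv] hs.2 (by rintro c hc p hp; cases hc; exact hs.1 p hp) x]
      simp only [covP_cons]
      have := covP_nil x
      tauto
    | c :: racc =>
      have hc : c.1 ≤ iv.1 := hacc c rfl iv List.mem_cons_self
      rw [mergeStep_cons]
      by_cases hov : iv.1 ≤ c.2 + 1
      · rw [if_pos hov,
          ih ((c.1, max c.2 iv.2) :: racc) hs.2
            (by rintro d hd p hp; cases hd; exact le_trans hc (hs.1 p hp)) x]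
        simp only [covP_cons]
        have key : (c.1 ≤ x ∧ x ≤ max c.2 iv.2)
            ↔ ((c.1 ≤ x ∧ x ≤ c.2) ∨ (iv.1 ≤ x ∧ x ≤ iv.2)) := by omega
        tauto
      · rw [if_neg hov,
          ih (iv :: c :: racc) hs.2
            (by rintro d hd p hp; cases hd; exact hs.1 p hp) x]
        simp only [covP_cons]
        tauto

-- stage 3, inner loop: add the in-range x's that are not beacons
theorem mem_inner (bea : PySem.Set Int) (l : List Int) :
    ∀ (res : PySem.Set Int) (x : Int),
    x ∈ l.foldl (fun res z => if bea.contains z then res else PySem.Set.add res z) res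
      ↔ x ∈ res ∨ (x ∈ l ∧ x ∉ bea) := by
  induction l with
  | nil => intro res x; simp
  | cons z rest ih =>
    intro res x
    rw [List.foldl_cons]
    by_cases hz : bea.contains z
    · rw [if_pos hz, ih]
      have hz' : z ∈ bea := by simpa using hz
      simp only [List.mem_cons]
      constructor
      · rintro (h | ⟨h1, h2⟩)
        · exact Or.inl h
        · exact Or.inr ⟨Or.inr h1, h2⟩
      · rintro (h | ⟨h1 | h1, h2⟩)
        · exact Or.inl h
        · exact absurd (h1 ▸ hz') h2
        · exact Or.inr ⟨h1, h2⟩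
    · rw [if_neg hz, ih]
      have hz' : z ∉ bea := fun h => hz (by simpa using h)
      rw [PySem.Set.mem_add]
      simp only [List.mem_cons]
      constructor
      · rintro ((h | h) | ⟨h1, h2⟩)
        · exact Or.inl h
        · exact Or.inr ⟨Or.inl h, h ▸ hz'⟩
        · exact Or.inr ⟨Or.inr h1, h2⟩
      · rintro (h | ⟨h1 | h1, h2⟩)
        · exact Or.inl (Or.inl h)
        · exact Or.inl (Or.inr h1)
        · exact Or.inr ⟨h1, h2⟩

theorem nodup_inner (bea : PySem.Set Int) (l : List Int) :
    ∀ res : PySem.Set Int, List.Nodup res →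
    List.Nodup (l.foldl (fun res z => if bea.contains z then res else PySem.Set.add res z) res) := by
  induction l with
  | nil => intro res h; simpa
  | cons z rest ih =>
    intro res h
    rw [List.foldl_cons]
    by_cases hz : bea.contains z
    · rw [if_pos hz]; exact ih res h
    · rw [if_neg hz]; exact ih _ (PySem.Set.nodup_add res z h)

-- stage 3, outer loop over the merged intervals
theorem mem_result (bea : PySem.Set Int) (merged : List (Int × Int)) :
    ∀ (res : PySem.Set Int) (x : Int),
    x ∈ merged.foldl (fun res p =>
        (PySem.List.pyRange p.1 (p.2 + 1) 1).foldl
          (fun res x => if bea.contains x then res else PySem.Set.add res x) res) res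
      ↔ x ∈ res ∨ (covP merged x ∧ x ∉ bea) := by
  induction merged with
  | nil =>
    intro res x
    simp only [List.foldl_nil]
    have := covP_nil x
    tauto
  | cons p rest ih =>
    intro res x
    rw [List.foldl_cons, ih, mem_inner, covP_cons]
    simp only [PySem.List.mem_pyRange_one]
    have key : (p.1 ≤ x ∧ x < p.2 + 1) ↔ (p.1 ≤ x ∧ x ≤ p.2) := by omega
    tauto

theorem nodup_result (bea : PySem.Set Int) (merged : List (Int × Int)) :
    ∀ res : PySem.Set Int, List.Nodup res →
    List.Nodup (merged.foldl (fun res p =>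
        (PySem.List.pyRange p.1 (p.2 + 1) 1).foldl
          (fun res x => if bea.contains x then res else PySem.Set.add res x) res) res) := by
  induction merged with
  | nil => intro res h; simpa
  | cons p rest ih =>
    intro res h
    rw [List.foldl_cons]
    exact ih _ (nodup_inner bea _ res h)

-- ===== VERDICT (by name: the statements are the Claim_ definitions above) =====
theorem omitted_positions_spec : Claim_equal_omitted_positions := by
  intro pairs y _ _
  show omitted_positions pairs y = omitted_positions_alt pairs y
  unfold omitted_positions omitted_positions_alt
  rw [outer_loop]
  rw [PySem.List.sorted_id_eq_sorted_id_iff_perm]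
  have hnodA : List.Nodup (PySem.Set.diff
      (PySem.Set.update PySem.Set.empty (pairs.flatMap (coveredA y)))
      (PySem.Set.update PySem.Set.empty
        ((pairs.filter (fun pr => PySem.List.pyGetD (PySem.List.pyGetD pr 1 []) 1 0 == y)).map
          (fun pr => PySem.List.pyGetD (PySem.List.pyGetD pr 1 []) 0 0)))) :=
    PySem.Set.nodup_diff _ _ (PySem.Set.nodup_update _ _ List.nodup_nil)
  have hnodB := nodup_result (beaconsB pairs y)
      ((((PySem.List.sorted (intervalsB pairs y) Prod.fst).foldl mergeStep []).reverse))
      PySem.Set.empty List.nodup_nil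
  rw [List.perm_ext_iff_of_nodup hnodA hnodB]
  intro x
  rw [PySem.Set.mem_diff, PySem.Set.mem_update, PySem.Set.mem_update, mem_result]
  have hA : ¬ x ∈ (PySem.Set.empty : PySem.Set Int) := List.not_mem_nil
  have hcov : covP (((PySem.List.sorted (intervalsB pairs y) Prod.fst).foldl mergeStep []).reverse) x
      ↔ x ∈ pairs.flatMap (coveredA y) := by
    rw [covP_perm (List.reverse_perm _) x,
      covP_merge _ [] (PySem.List.sorted_pairwise (intervalsB pairs y) Prod.fst)
        (by rintro c hc; cases hc) x,
      covP_perm (PySem.List.sorted_perm (intervalsB pairs y) Prod.fst false) x,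
      covP_intervalsB, List.mem_flatMap]
    have := covP_nil x
    tauto
  have hbea : x ∈ beaconsB pairs y
      ↔ x ∈ ((pairs.filter (fun pr => PySem.List.pyGetD (PySem.List.pyGetD pr 1 []) 1 0 == y)).map
          (fun pr => PySem.List.pyGetD (PySem.List.pyGetD pr 1 []) 0 0)) := by
    unfold beaconsB
    rw [PySem.Set.mem_ofList]
  rw [hcov] at *
  tauto
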